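-- pv_equiv track=rewrite | github.com/ralfbecher/orionbelt-runner | src/orionbelt_runner/spec.py | _extract_leading_comment
-- ===== SOURCE A (Python) =====
-- def _extract_leading_comment(text: str) -> str | None:
--     """Return the leading ``# …`` block of a YAML file as plain text.
--
--     Walks lines from the top, collecting comment bodies (with the leading
--     ``# `` stripped) and stopping at the first non-comment, non-blank line.
--     Blank lines inside the comment block are preserved so callers can split
--     a heading from a body. Returns ``None`` when there's no leading
--     comment.
--     """
--     collected: list[str] = []
--     started = False
--     for line in text.splitlines():
--         stripped = line.strip()
--         if stripped.startswith("#"):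
--             content = stripped.lstrip("#").lstrip()
--             collected.append(content)
--             started = True
--         elif stripped == "":
--             if started:
--                 collected.append("")
--             # else: skip leading blank lines
--         else:
--             break
--     while collected and not collected[-1]:
--         collected.pop()
--     return "\n".join(collected) if collected else None
-- ===== SOURCE B (Python) =====
-- def _extract_leading_comment(text: str) -> str | None:
--     """Pipeline version: take the leading comment/blank run, trim, map, join."""
--     stripped = [ln.strip() for ln in text.splitlines()]
--     n = next((i for i, s in enumerate(stripped) if s and not s.startswith("#")), len(stripped))
--     lo = 0
--     while lo < n and stripped[lo] == "":
--         lo += 1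
--     block = [s.lstrip("#").lstrip() for s in stripped[lo:n]]
--     hi = len(block)
--     while hi > 0 and block[hi - 1] == "":
--         hi -= 1
--     return "\n".join(block[:hi]) if hi else None
-- ===== Notes on version B (the rewrite author's own statement) =====
-- stated objective: alternative
-- what changed: A's single stateful scan with a begun-flag plus a trailing pop-while loop is replaced by a stateless pipeline: take the leading comment/blank prefix, drop leading blank lines, map each line to its comment content, drop trailing empty entries, then join.
import Mathlib
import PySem

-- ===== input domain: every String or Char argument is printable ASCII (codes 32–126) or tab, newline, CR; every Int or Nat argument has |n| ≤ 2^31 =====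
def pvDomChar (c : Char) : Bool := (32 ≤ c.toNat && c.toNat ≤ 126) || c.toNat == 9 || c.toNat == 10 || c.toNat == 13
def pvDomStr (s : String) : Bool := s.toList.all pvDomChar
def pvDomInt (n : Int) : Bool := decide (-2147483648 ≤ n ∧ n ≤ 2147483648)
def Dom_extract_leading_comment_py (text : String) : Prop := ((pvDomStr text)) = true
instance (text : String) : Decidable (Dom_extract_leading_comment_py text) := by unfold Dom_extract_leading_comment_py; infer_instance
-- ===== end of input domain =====

-- B replaces A's single stateful scan (started flag + trailing pop loop) by a
-- takeWhile/dropWhile/map pipeline; objective: alternative decomposition, same cost.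

-- ===== PORT A =====
-- stripped.lstrip("#").lstrip(): dropWhile (· == '#') is exact for lstrip with the one-char set "#"
def pvContentA (s : List Char) : List Char := PySem.Chars.lstrip (s.dropWhile (· == '#'))

def pvLoopA : List (List Char) → List (List Char) → Bool → List (List Char)
  | [], col, _ => col
  | l :: ls, col, started =>
      let s := PySem.Chars.strip l
      if PySem.Chars.startswith s ['#'] then pvLoopA ls (col ++ [pvContentA s]) true
      else if s = [] then
        (if started then pvLoopA ls (col ++ [[]]) started else pvLoopA ls col started)
      else col

-- `while collected and not collected[-1]: collected.pop()`
def pvPopA (col : List (List Char)) : List (List Char) :=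
  if h : col.getLast? = some [] then pvPopA col.dropLast else col
termination_by col.length
decreasing_by
  cases col with
  | nil => simp at h
  | cons a as => simp [List.length_dropLast]

def extract_leading_comment_py (text : String) : Option String :=
  let col := pvPopA (pvLoopA (PySem.Chars.splitlines text.toList) [] false)
  if col = [] then none else some (String.ofList (PySem.Chars.join ['\n'] col))

-- ===== PORT B =====
def extract_leading_comment_py_alt (text : String) : Option String :=
  let stripped := (PySem.Chars.splitlines text.toList).map PySem.Chars.strip
  let pre := stripped.takeWhile (fun s => !(!s.isEmpty && !PySem.Chars.startswith s ['#']))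
  let body := pre.dropWhile (fun s => s.isEmpty)
  let block := body.map (fun s => PySem.Chars.lstrip (s.dropWhile (· == '#')))
  let kept := (block.reverse.dropWhile (fun s => s.isEmpty)).reverse
  if kept.isEmpty then none else some (String.ofList (PySem.Chars.join ['\n'] kept))

-- ===== PRECONDITION & SPEC =====
def Spec_extract_leading_comment_py (text : String) (out : Option String) : Prop := out = extract_leading_comment_py_alt text
instance (text : String) (out : Option String) : Decidable (Spec_extract_leading_comment_py text out) := by unfold Spec_extract_leading_comment_py; infer_instance

-- ===== CLAIM (what is proved, stated in full; the proofs are below) =====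
def Claim_equal_extract_leading_comment_py : Prop := ∀ (text : String), Dom_extract_leading_comment_py text → Spec_extract_leading_comment_py text (extract_leading_comment_py text)

-- ===== LEMMAS AND PROOFS =====

theorem pv_sw_ne (s : List Char) (h : PySem.Chars.startswith s ['#'] = true) : s.isEmpty = false := by
  rw [PySem.Chars.startswith_iff] at h
  cases s with
  | nil => simp at h
  | cons a as => rfl

theorem pvLoopA_true (ls : List (List Char)) (col : List (List Char)) :
    pvLoopA ls col true =
      col ++ ((ls.map PySem.Chars.strip).takeWhile
        (fun s => !(!s.isEmpty && !PySem.Chars.startswith s ['#']))).map pvContentA := by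
  induction ls generalizing col with
  | nil => simp [pvLoopA]
  | cons l ls ih =>
    simp only [pvLoopA, List.map_cons, List.takeWhile_cons]
    by_cases h : PySem.Chars.startswith (PySem.Chars.strip l) ['#'] = true
    · simp [h, pv_sw_ne _ h, ih, List.append_assoc]
    · rw [if_neg h]
      by_cases he : PySem.Chars.strip l = []
      · rw [if_pos he]
        simp only [if_true]
        have hh : PySem.Chars.startswith ([] : List Char) ['#'] = false := by decide
        simp [he, hh, ih, pvContentA, List.append_assoc, PySem.Chars.lstrip]
      · have hne : (PySem.Chars.strip l).isEmpty = false := by simpa [List.isEmpty_iff] using he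
        simp [he, eq_false_of_ne_true h, hne]

theorem pvLoopA_false (ls : List (List Char)) :
    pvLoopA ls [] false =
      (((ls.map PySem.Chars.strip).takeWhile
        (fun s => !(!s.isEmpty && !PySem.Chars.startswith s ['#']))).dropWhile
          (fun s => s.isEmpty)).map pvContentA := by
  induction ls with
  | nil => simp [pvLoopA]
  | cons l ls ih =>
    simp only [pvLoopA, List.map_cons, List.takeWhile_cons]
    by_cases h : PySem.Chars.startswith (PySem.Chars.strip l) ['#'] = true
    · simp [h, pv_sw_ne _ h, pvLoopA_true]
    · rw [if_neg h]
      by_cases he : PySem.Chars.strip l = []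
      · rw [if_pos he]
        have hh : PySem.Chars.startswith ([] : List Char) ['#'] = false := by decide
        simp [he, hh, ih]
      · have hne : (PySem.Chars.strip l).isEmpty = false := by simpa [List.isEmpty_iff] using he
        simp [he, eq_false_of_ne_true h, hne]

theorem pvPopA_eq (col : List (List Char)) :
    pvPopA col = (col.reverse.dropWhile (fun s => s.isEmpty)).reverse := by
  induction col using List.reverseRecOn with
  | nil => rw [pvPopA]; simp
  | append_singleton as a ih =>
    rw [pvPopA]
    by_cases ha : a = ([] : List Char)
    · subst ha
      simp [ih]
    · have hlast : (as ++ [a]).getLast? = some a := by simp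
      rw [dif_neg (by simp [hlast, ha])]
      have hne : a.isEmpty = false := by simpa [List.isEmpty_iff] using ha
      simp [hne]

-- ===== VERDICT (by name: the statement is the Claim_ definition above) =====
theorem extract_leading_comment_py_spec : Claim_equal_extract_leading_comment_py := by
  intro text _
  unfold Spec_extract_leading_comment_py extract_leading_comment_py extract_leading_comment_py_alt
  simp only [pvLoopA_false, pvPopA_eq, List.isEmpty_iff, List.reverse_eq_nil_iff]
  rfl
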